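-- pv_equiv track=rewrite | github.com/pengwow/examples | python/work_demo/up_down.py | find_upstream_keys
-- ===== SOURCE A (Python) =====
-- flow_relation_data = {
--     "CCS_abc": {"up":[
--         {'syscode': 'aaa', 'deployunit': 'eee', 'direction': 'up'},
--         {'syscode': 'aom', 'deployunit': '', 'direction': 'up'},
--         ], "down":[]},
--     "AOM_bcc": {"up":[
--         {'syscode': 'ccs', 'deployunit': 'abc', 'direction': 'up'}], "down":[]},
--     "DDD_qqq": {"up":[
--         {'syscode': 'ccs', 'deployunit': 'abc', 'direction': 'up'},
--         {'syscode': 'aom', 'deployunit': '', 'direction': 'up'}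
--         ], "down":[]},
-- }
--
-- def find_upstream_keys(syscode, deployunit, visited=None, upstream_keys=None):
--     """
--     递归查找指定资源的所有上游key
--
--     参数:
--         syscode: 系统编码（大写）
--         deployunit: 部署单元
--         visited: 已访问的资源集合，用于避免循环引用
--         upstream_keys: 收集到的上游key列表
--
--     返回:
--         list: 所有上游key的列表，按层级顺序排列
--     """
--     # 初始化默认值
--     if upstream_keys is None:
--         upstream_keys = []
--
--     # 参数验证，当参数无效时直接返回上游key列表
--     if not syscode or not deployunit:
--         return upstream_keys
--
--     # 转换syscode为大写
--     syscode = str(syscode).upper()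
--
--     # 构建当前资源的key
--     current_key = f"{syscode}_{deployunit}"
--
--     # 初始化已访问集合和上游key列表
--     if visited is None:
--         visited = set()
--     if upstream_keys is None:
--         upstream_keys = []
--
--     # 检查是否已访问过该资源，避免循环引用
--     if current_key in visited:
--         return upstream_keys
--     visited.add(current_key)
--
--     # 检查当前资源是否存在于数据中
--     if current_key not in flow_relation_data:
--         return upstream_keys
--
--     # 获取当前资源的上游关系
--     upstream_relations = flow_relation_data[current_key].get('up', [])
--
--     # 递归查找每个上游关系
--     for relation in upstream_relations:
--         # 获取上游资源的syscode和deployunit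
--         upstream_syscode = relation.get('syscode', '').upper()
--         upstream_deployunit = relation.get('deployunit', '')
--
--         if upstream_syscode and upstream_deployunit:
--             # 构建上游资源的key
--             upstream_key = f"{upstream_syscode}_{upstream_deployunit}"
--
--             # 添加所有找到的上游key，无论是否存在于flow_relation_data中
--             if upstream_key not in upstream_keys:
--                 upstream_keys.append(upstream_key)
--
--             # 递归查找上游的上游
--             find_upstream_keys(upstream_syscode, upstream_deployunit, visited, upstream_keys)
--
--     return upstream_keys
-- ===== SOURCE B (Python) =====
-- # B: iterative DFS with an explicit stack of relation iterators instead of recursion.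
-- # Note: like A, mutates the caller-supplied visited set (and upstream_keys list) in place.
-- flow_relation_data = {
--     "CCS_abc": {"up":[
--         {'syscode': 'aaa', 'deployunit': 'eee', 'direction': 'up'},
--         {'syscode': 'aom', 'deployunit': '', 'direction': 'up'},
--         ], "down":[]},
--     "AOM_bcc": {"up":[
--         {'syscode': 'ccs', 'deployunit': 'abc', 'direction': 'up'}], "down":[]},
--     "DDD_qqq": {"up":[
--         {'syscode': 'ccs', 'deployunit': 'abc', 'direction': 'up'},
--         {'syscode': 'aom', 'deployunit': '', 'direction': 'up'}
--         ], "down":[]},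
-- }
--
-- def find_upstream_keys(syscode, deployunit, visited=None, upstream_keys=None):
--     if upstream_keys is None:
--         upstream_keys = []
--     if not syscode or not deployunit:
--         return upstream_keys
--     if visited is None:
--         visited = set()
--     current_key = str(syscode).upper() + "_" + deployunit
--     if current_key in visited:
--         return upstream_keys
--     visited.add(current_key)
--     if current_key not in flow_relation_data:
--         return upstream_keys
--     stack = [iter(flow_relation_data[current_key].get('up', []))]
--     while stack:
--         rel = next(stack[-1], None)
--         if rel is None:
--             stack.pop()
--             continue
--         s = rel.get('syscode', '').upper()
--         d = rel.get('deployunit', '')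
--         if not s or not d:
--             continue
--         k = s + "_" + d
--         if k not in upstream_keys:
--             upstream_keys.append(k)
--         if k not in visited:
--             visited.add(k)
--             if k in flow_relation_data:
--                 stack.append(iter(flow_relation_data[k].get('up', [])))
--     return upstream_keys
-- ===== Notes on version B (the rewrite author's own statement) =====
-- stated objective: alternative
-- what changed: The recursive DFS is replaced by an iterative DFS driven by an explicit LIFO stack of relation iterators, preserving the pre-order add-before-descend traversal and the add-even-if-already-visited behaviour.
import Mathlib
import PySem

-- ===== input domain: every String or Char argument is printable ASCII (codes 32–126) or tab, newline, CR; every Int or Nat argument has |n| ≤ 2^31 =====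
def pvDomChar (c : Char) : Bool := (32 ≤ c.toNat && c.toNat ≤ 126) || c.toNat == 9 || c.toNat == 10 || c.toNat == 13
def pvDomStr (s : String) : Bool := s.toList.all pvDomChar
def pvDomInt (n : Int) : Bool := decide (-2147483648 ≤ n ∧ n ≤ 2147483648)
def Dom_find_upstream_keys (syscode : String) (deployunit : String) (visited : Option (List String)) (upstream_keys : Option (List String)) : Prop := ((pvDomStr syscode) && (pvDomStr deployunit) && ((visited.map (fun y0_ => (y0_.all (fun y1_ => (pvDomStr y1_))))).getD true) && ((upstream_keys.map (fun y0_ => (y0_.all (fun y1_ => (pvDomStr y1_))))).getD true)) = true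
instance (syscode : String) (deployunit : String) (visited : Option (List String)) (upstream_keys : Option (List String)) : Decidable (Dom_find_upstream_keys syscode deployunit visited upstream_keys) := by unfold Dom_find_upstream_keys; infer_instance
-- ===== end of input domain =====

-- B replaces A's recursion with an explicit LIFO stack of relation iterators (same return value;
-- like A, both Pythons mutate the caller-supplied visited set / upstream_keys list in place —
-- the equivalence proved here is about the return value).


-- ===== PORT A =====
-- A-side helpers: the module-level flow_relation_data literal (dicts as PySem.Dict)
def pvRel (s d : String) : PySem.Dict String String :=
  PySem.Dict.ofList [("syscode", s), ("deployunit", d), ("direction", "up")]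

def pvFlowRelationData : PySem.Dict String (PySem.Dict String (List (PySem.Dict String String))) :=
  PySem.Dict.ofList
    [ ("CCS_abc", PySem.Dict.ofList [("up", [pvRel "aaa" "eee", pvRel "aom" ""]), ("down", [])])
    , ("AOM_bcc", PySem.Dict.ofList [("up", [pvRel "ccs" "abc"]), ("down", [])])
    , ("DDD_qqq", PySem.Dict.ofList [("up", [pvRel "ccs" "abc", pvRel "aom" ""]), ("down", [])]) ]

-- recursive body of A; fuel only makes the recursion structural (never exhausted: depth ≤ 4)
def pvGoA : Nat → String → String → PySem.Set String → List String → PySem.Set String × List String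
  | 0, _, _, visited, keys => (visited, keys)
  | fuel + 1, syscode, deployunit, visited, keys =>
    if syscode = "" ∨ deployunit = "" then (visited, keys)
    else
      let ck := PySem.Str.upper syscode ++ "_" ++ deployunit
      if PySem.Set.contains visited ck then (visited, keys)
      else
        let visited' := PySem.Set.add visited ck
        match pvFlowRelationData.get? ck with
        | none => (visited', keys)
        | some node =>
          (node.getD "up" []).foldl
            (fun st rel =>
              let us := PySem.Str.upper (rel.getD "syscode" "")
              let ud := rel.getD "deployunit" ""
              if us = "" ∨ ud = "" then st
              else
                let uk := us ++ "_" ++ ud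
                let keys' := if st.2.contains uk then st.2 else st.2 ++ [uk]
                pvGoA fuel us ud st.1 keys')
            (visited', keys)

def find_upstream_keys (syscode : String) (deployunit : String) (visited : Option (List String)) (upstream_keys : Option (List String)) : List String :=
  let keys := upstream_keys.getD []
  if syscode = "" ∨ deployunit = "" then keys
  else (pvGoA 10 syscode deployunit (visited.getD PySem.Set.empty) keys).2

-- ===== PORT B =====
-- iterative DFS: stack of remaining-relation lists (the iterators of Source B)
def pvGoB : Nat → List (List (PySem.Dict String String)) → PySem.Set String → List String → List String
  | 0, _, _, keys => keys
  | _ + 1, [], _, keys => keys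
  | fuel + 1, [] :: rest, visited, keys => pvGoB fuel rest visited keys
  | fuel + 1, (rel :: frame) :: rest, visited, keys =>
    let s := PySem.Str.upper (rel.getD "syscode" "")
    let d := rel.getD "deployunit" ""
    if s = "" ∨ d = "" then pvGoB fuel (frame :: rest) visited keys
    else
      let k := s ++ "_" ++ d
      let keys' := if keys.contains k then keys else keys ++ [k]
      if PySem.Set.contains visited k then pvGoB fuel (frame :: rest) visited keys'
      else
        let visited' := PySem.Set.add visited k
        match pvFlowRelationData.get? k with
        | none => pvGoB fuel (frame :: rest) visited' keys'
        | some node => pvGoB fuel ((node.getD "up" []) :: frame :: rest) visited' keys'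

def find_upstream_keys_alt (syscode : String) (deployunit : String) (visited : Option (List String)) (upstream_keys : Option (List String)) : List String :=
  let keys := upstream_keys.getD []
  if syscode = "" ∨ deployunit = "" then keys
  else
    let vis := visited.getD PySem.Set.empty
    let ck := PySem.Str.upper syscode ++ "_" ++ deployunit
    if PySem.Set.contains vis ck then keys
    else
      match pvFlowRelationData.get? ck with
      | none => keys
      | some node => pvGoB 30 [node.getD "up" []] (PySem.Set.add vis ck) keys

-- ===== PRECONDITION & SPEC =====
def Spec_find_upstream_keys (syscode : String) (deployunit : String) (visited : Option (List String)) (upstream_keys : Option (List String)) (out : List String) : Prop := out = find_upstream_keys_alt syscode deployunit visited upstream_keys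
instance (syscode : String) (deployunit : String) (visited : Option (List String)) (upstream_keys : Option (List String)) (out : List String) : Decidable (Spec_find_upstream_keys syscode deployunit visited upstream_keys out) := by unfold Spec_find_upstream_keys; infer_instance

-- ===== CLAIM (what is proved, stated in full; the proofs are below) =====
def Claim_equal_find_upstream_keys : Prop := ∀ (syscode : String) (deployunit : String) (visited : Option (List String)) (upstream_keys : Option (List String)), Dom_find_upstream_keys syscode deployunit visited upstream_keys → Spec_find_upstream_keys syscode deployunit visited upstream_keys (find_upstream_keys syscode deployunit visited upstream_keys)

-- ===== LEMMAS AND PROOFS =====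
-- ===== lookup & literal-evaluation facts =====
def pvNode (ups : List (PySem.Dict String String)) : PySem.Dict String (List (PySem.Dict String String)) :=
  PySem.Dict.ofList [("up", ups), ("down", [])]

def pvUpCCS : List (PySem.Dict String String) := [pvRel "aaa" "eee", pvRel "aom" ""]
def pvUpAOM : List (PySem.Dict String String) := [pvRel "ccs" "abc"]
def pvUpDDD : List (PySem.Dict String String) := [pvRel "ccs" "abc", pvRel "aom" ""]

lemma pv_hmk : pvFlowRelationData = PySem.Dict.mk
    [("CCS_abc", pvNode pvUpCCS), ("AOM_bcc", pvNode pvUpAOM), ("DDD_qqq", pvNode pvUpDDD)] := by rfl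

lemma pv_get?_CCS : pvFlowRelationData.get? "CCS_abc" = some (pvNode pvUpCCS) := by decide
lemma pv_get?_AOM : pvFlowRelationData.get? "AOM_bcc" = some (pvNode pvUpAOM) := by decide
lemma pv_get?_DDD : pvFlowRelationData.get? "DDD_qqq" = some (pvNode pvUpDDD) := by decide

lemma pv_get?_none (ck : String) (h1 : ck ≠ "CCS_abc") (h2 : ck ≠ "AOM_bcc") (h3 : ck ≠ "DDD_qqq") :
    pvFlowRelationData.get? ck = none := by
  rw [pv_hmk]
  simp [PySem.Dict.get?_mk_cons, Ne.symm h1, Ne.symm h2, Ne.symm h3]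
  rfl

lemma pv_getD_up (ups : List (PySem.Dict String String)) : (pvNode ups).getD "up" [] = ups := by
  simp [pvNode, PySem.Dict.ofList, PySem.Dict.getD, PySem.Dict.get?]; rfl

lemma pv_aaa_s : (pvRel "aaa" "eee").getD "syscode" "" = "aaa" := by decide
lemma pv_aaa_d : (pvRel "aaa" "eee").getD "deployunit" "" = "eee" := by decide
lemma pv_aom_s : (pvRel "aom" "").getD "syscode" "" = "aom" := by decide
lemma pv_aom_d : (pvRel "aom" "").getD "deployunit" "" = "" := by decide
lemma pv_ccs_s : (pvRel "ccs" "abc").getD "syscode" "" = "ccs" := by decide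
lemma pv_ccs_d : (pvRel "ccs" "abc").getD "deployunit" "" = "abc" := by decide
lemma pv_up_aaa : PySem.Str.upper "aaa" = "AAA" := by decide
lemma pv_up_AAA : PySem.Str.upper "AAA" = "AAA" := by decide
lemma pv_up_aom : PySem.Str.upper "aom" = "AOM" := by decide
lemma pv_up_ccs : PySem.Str.upper "ccs" = "CCS" := by decide
lemma pv_up_CCS : PySem.Str.upper "CCS" = "CCS" := by decide
lemma pv_cat_AAA : ("AAA" : String) ++ "_" ++ "eee" = "AAA_eee" := by decide
lemma pv_cat_CCS : ("CCS" : String) ++ "_" ++ "abc" = "CCS_abc" := by decide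
lemma pv_get?_none_AAA : pvFlowRelationData.get? "AAA_eee" = none := by decide

-- ===== A-side node evaluations =====
lemma goA_CCS (fuel : Nat) (syscode deployunit : String) (v : PySem.Set String) (keys : List String)
    (hs : ¬(syscode = "" ∨ deployunit = ""))
    (hck : PySem.Str.upper syscode ++ "_" ++ deployunit = "CCS_abc") :
    pvGoA (fuel + 2) syscode deployunit v keys =
      (if "CCS_abc" ∈ v then (v, keys)
       else ((if "AAA_eee" ∈ PySem.Set.add v "CCS_abc"
                then PySem.Set.add v "CCS_abc"
                else PySem.Set.add (PySem.Set.add v "CCS_abc") "AAA_eee"),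
             if "AAA_eee" ∈ keys then keys else keys ++ ["AAA_eee"])) := by
  by_cases h : "CCS_abc" ∈ v
  · simp [pvGoA, hck, hs, h]
  · by_cases h3 : "AAA_eee" ∈ keys <;>
    · simp [pvGoA, hck, hs, h, h3, pv_get?_CCS, pv_getD_up, pvUpCCS,
            pv_aaa_s, pv_aaa_d, pv_aom_s, pv_aom_d, pv_up_aaa, pv_up_AAA, pv_cat_AAA,
            pv_get?_none_AAA]
      split_ifs <;> rfl

lemma goA_AOM (fuel : Nat) (syscode deployunit : String) (v : PySem.Set String) (keys : List String)
    (hs : ¬(syscode = "" ∨ deployunit = ""))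
    (hck : PySem.Str.upper syscode ++ "_" ++ deployunit = "AOM_bcc") :
    pvGoA (fuel + 3) syscode deployunit v keys =
      (if "AOM_bcc" ∈ v then (v, keys)
       else if "CCS_abc" ∈ v then
         (PySem.Set.add v "AOM_bcc",
          if "CCS_abc" ∈ keys then keys else keys ++ ["CCS_abc"])
       else
         ((if "AAA_eee" ∈ v then PySem.Set.add (PySem.Set.add v "AOM_bcc") "CCS_abc"
             else PySem.Set.add (PySem.Set.add (PySem.Set.add v "AOM_bcc") "CCS_abc") "AAA_eee"),
          if "AAA_eee" ∈ (if "CCS_abc" ∈ keys then keys else keys ++ ["CCS_abc"])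
            then (if "CCS_abc" ∈ keys then keys else keys ++ ["CCS_abc"])
            else (if "CCS_abc" ∈ keys then keys else keys ++ ["CCS_abc"]) ++ ["AAA_eee"])) := by
  by_cases h1 : "AOM_bcc" ∈ v
  · simp [pvGoA, hck, hs, h1]
  · by_cases h2 : "CCS_abc" ∈ v <;> by_cases h3 : "CCS_abc" ∈ keys <;>
      by_cases h4 : "AAA_eee" ∈ v <;> by_cases h5 : "AAA_eee" ∈ keys <;>
    · simp [pvGoA, hck, hs, h1, h2, h3, h4, h5, pv_get?_CCS, pv_get?_AOM, pv_getD_up,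
            pvUpCCS, pvUpAOM, pv_aaa_s, pv_aaa_d, pv_aom_s, pv_aom_d, pv_ccs_s, pv_ccs_d,
            pv_up_aaa, pv_up_AAA, pv_up_ccs, pv_up_CCS, pv_cat_AAA, pv_cat_CCS, pv_get?_none_AAA]

lemma goA_DDD (fuel : Nat) (syscode deployunit : String) (v : PySem.Set String) (keys : List String)
    (hs : ¬(syscode = "" ∨ deployunit = ""))
    (hck : PySem.Str.upper syscode ++ "_" ++ deployunit = "DDD_qqq") :
    pvGoA (fuel + 3) syscode deployunit v keys =
      (if "DDD_qqq" ∈ v then (v, keys)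
       else if "CCS_abc" ∈ v then
         (PySem.Set.add v "DDD_qqq",
          if "CCS_abc" ∈ keys then keys else keys ++ ["CCS_abc"])
       else
         ((if "AAA_eee" ∈ v then PySem.Set.add (PySem.Set.add v "DDD_qqq") "CCS_abc"
             else PySem.Set.add (PySem.Set.add (PySem.Set.add v "DDD_qqq") "CCS_abc") "AAA_eee"),
          if "AAA_eee" ∈ (if "CCS_abc" ∈ keys then keys else keys ++ ["CCS_abc"])
            then (if "CCS_abc" ∈ keys then keys else keys ++ ["CCS_abc"])
            else (if "CCS_abc" ∈ keys then keys else keys ++ ["CCS_abc"]) ++ ["AAA_eee"])) := by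
  by_cases h1 : "DDD_qqq" ∈ v
  · simp [pvGoA, hck, hs, h1]
  · by_cases h2 : "CCS_abc" ∈ v <;> by_cases h3 : "CCS_abc" ∈ keys <;>
      by_cases h4 : "AAA_eee" ∈ v <;> by_cases h5 : "AAA_eee" ∈ keys <;>
    · simp [pvGoA, hck, hs, h1, h2, h3, h4, h5, pv_get?_CCS, pv_get?_DDD, pv_getD_up,
            pvUpCCS, pvUpDDD, pv_aaa_s, pv_aaa_d, pv_aom_s, pv_aom_d, pv_ccs_s, pv_ccs_d,
            pv_up_aaa, pv_up_AAA, pv_up_ccs, pv_up_CCS, pv_cat_AAA, pv_cat_CCS, pv_get?_none_AAA]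

-- ===== B-side frame evaluations =====
lemma goB_nil (fuel : Nat) (v : PySem.Set String) (keys : List String) :
    pvGoB (fuel + 1) [] v keys = keys := by simp [pvGoB]

lemma goB_CCSframe (fuel : Nat) (rest : List (List (PySem.Dict String String)))
    (v : PySem.Set String) (keys : List String) :
    pvGoB (fuel + 3) (pvUpCCS :: rest) v keys =
      pvGoB fuel rest (if "AAA_eee" ∈ v then v else PySem.Set.add v "AAA_eee")
        (if "AAA_eee" ∈ keys then keys else keys ++ ["AAA_eee"]) := by
  by_cases h1 : "AAA_eee" ∈ v <;> by_cases h2 : "AAA_eee" ∈ keys <;>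
  · simp [pvGoB, pvUpCCS, h1, h2, pv_aaa_s, pv_aaa_d, pv_aom_s, pv_aom_d,
          pv_up_aaa, pv_up_AAA, pv_cat_AAA, pv_get?_none_AAA]

lemma goB_AOMrel_vis (fuel : Nat) (frame : List (PySem.Dict String String))
    (rest : List (List (PySem.Dict String String))) (v : PySem.Set String) (keys : List String)
    (h : "CCS_abc" ∈ v) :
    pvGoB (fuel + 1) ((pvRel "ccs" "abc" :: frame) :: rest) v keys =
      pvGoB fuel (frame :: rest) v
        (if "CCS_abc" ∈ keys then keys else keys ++ ["CCS_abc"]) := by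
  by_cases h2 : "CCS_abc" ∈ keys <;>
  · simp [pvGoB, h, h2, pv_ccs_s, pv_ccs_d, pv_up_ccs, pv_cat_CCS]

lemma goB_AOMrel_new (fuel : Nat) (frame : List (PySem.Dict String String))
    (rest : List (List (PySem.Dict String String))) (v : PySem.Set String) (keys : List String)
    (h : "CCS_abc" ∉ v) :
    pvGoB (fuel + 4) ((pvRel "ccs" "abc" :: frame) :: rest) v keys =
      pvGoB fuel (frame :: rest)
        (if "AAA_eee" ∈ v then PySem.Set.add v "CCS_abc"
          else PySem.Set.add (PySem.Set.add v "CCS_abc") "AAA_eee")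
        (if "AAA_eee" ∈ (if "CCS_abc" ∈ keys then keys else keys ++ ["CCS_abc"])
          then (if "CCS_abc" ∈ keys then keys else keys ++ ["CCS_abc"])
          else (if "CCS_abc" ∈ keys then keys else keys ++ ["CCS_abc"]) ++ ["AAA_eee"]) := by
  have : fuel + 4 = (fuel + 1) + 3 := by omega
  rw [this]
  show pvGoB ((fuel + 1) + 3 - 3 + 3) _ _ _ = _
  by_cases h2 : "CCS_abc" ∈ keys <;> by_cases h3 : "AAA_eee" ∈ v <;> by_cases h4 : "AAA_eee" ∈ keys <;>
  · simp only [pvGoB, pv_ccs_s, pv_ccs_d, pv_up_ccs, pv_cat_CCS, Nat.add_sub_cancel]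
    simp [pvGoB, h, h2, h3, h4, pv_get?_CCS, pv_getD_up, goB_CCSframe,
          pv_ccs_s, pv_ccs_d, pv_up_ccs, pv_cat_CCS]

lemma goB_skiprel (fuel : Nat) (frame : List (PySem.Dict String String))
    (rest : List (List (PySem.Dict String String))) (v : PySem.Set String) (keys : List String) :
    pvGoB (fuel + 1) ((pvRel "aom" "" :: frame) :: rest) v keys =
      pvGoB fuel (frame :: rest) v keys := by
  simp [pvGoB, pv_aom_s, pv_aom_d, pv_up_aom]

lemma goB_pop (fuel : Nat) (rest : List (List (PySem.Dict String String)))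
    (v : PySem.Set String) (keys : List String) :
    pvGoB (fuel + 1) ([] :: rest) v keys = pvGoB fuel rest v keys := by
  simp [pvGoB]

lemma pv_main : ∀ (syscode deployunit : String) (visited upstream_keys : Option (List String)),
    find_upstream_keys syscode deployunit visited upstream_keys
      = find_upstream_keys_alt syscode deployunit visited upstream_keys := by
  intro syscode deployunit visited upstream_keys
  unfold find_upstream_keys find_upstream_keys_alt
  by_cases he : syscode = "" ∨ deployunit = ""
  · simp [he]
  · simp only [he, if_false]
    generalize (visited.getD PySem.Set.empty) = vis
    generalize (upstream_keys.getD ([] : List String)) = keys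
    by_cases hc1 : PySem.Str.upper syscode ++ "_" ++ deployunit = "CCS_abc"
    · rw [show (10:Nat) = 8+2 from rfl, goA_CCS 8 _ _ _ _ he hc1, hc1, pv_get?_CCS]
      by_cases hv : "CCS_abc" ∈ vis
      · simp [hv]
      · simp only [hv, if_neg, pv_getD_up]
        rw [show (30:Nat) = (26+1)+3 from rfl, goB_CCSframe, goB_nil]
        simp [hv]
    · by_cases hc2 : PySem.Str.upper syscode ++ "_" ++ deployunit = "AOM_bcc"
      · rw [show (10:Nat) = 7+3 from rfl, goA_AOM 7 _ _ _ _ he hc2, hc2, pv_get?_AOM]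
        by_cases hv : "AOM_bcc" ∈ vis
        · simp [hv]
        · simp only [hv, if_neg, pv_getD_up, pvUpAOM]
          by_cases hv2 : "CCS_abc" ∈ vis
          · rw [show (30:Nat) = 29+1 from rfl,
                goB_AOMrel_vis 29 _ _ _ _ (by simp [PySem.Set.mem_add, hv2]),
                show (29:Nat) = 28+1 from rfl, goB_pop, show (28:Nat) = 27+1 from rfl, goB_nil]
            simp [hv, hv2]
          · rw [show (30:Nat) = 26+4 from rfl,
                goB_AOMrel_new 26 _ _ _ _ (by simp [PySem.Set.mem_add, hv2]),
                show (26:Nat) = 25+1 from rfl, goB_pop, show (25:Nat) = 24+1 from rfl, goB_nil]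
            simp [hv, hv2, PySem.Set.mem_add]
      · by_cases hc3 : PySem.Str.upper syscode ++ "_" ++ deployunit = "DDD_qqq"
        · rw [show (10:Nat) = 7+3 from rfl, goA_DDD 7 _ _ _ _ he hc3, hc3, pv_get?_DDD]
          by_cases hv : "DDD_qqq" ∈ vis
          · simp [hv]
          · simp only [hv, if_neg, pv_getD_up, pvUpDDD]
            by_cases hv2 : "CCS_abc" ∈ vis
            · rw [show (30:Nat) = 29+1 from rfl,
                  goB_AOMrel_vis 29 _ _ _ _ (by simp [PySem.Set.mem_add, hv2]),
                  show (29:Nat) = 28+1 from rfl, goB_skiprel, show (28:Nat) = 27+1 from rfl, goB_pop,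
                  show (27:Nat) = 26+1 from rfl, goB_nil]
              simp [hv, hv2]
            · rw [show (30:Nat) = 26+4 from rfl,
                  goB_AOMrel_new 26 _ _ _ _ (by simp [PySem.Set.mem_add, hv2]),
                  show (26:Nat) = 25+1 from rfl, goB_skiprel, show (25:Nat) = 24+1 from rfl, goB_pop,
                  show (24:Nat) = 23+1 from rfl, goB_nil]
              simp [hv, hv2, PySem.Set.mem_add]
        · have hn := pv_get?_none _ hc1 hc2 hc3
          rw [show (10:Nat) = 9+1 from rfl]
          by_cases hv : (PySem.Str.upper syscode ++ "_" ++ deployunit) ∈ vis <;>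
            simp [pvGoA, he, hn, hv]


-- ===== VERDICT (by name: the statement is the Claim_ definition above) =====
theorem find_upstream_keys_spec : Claim_equal_find_upstream_keys := by
  intro syscode deployunit visited upstream_keys _
  unfold Spec_find_upstream_keys
  exact pv_main syscode deployunit visited upstream_keys
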